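-- pv_equiv track=rewrite | github.com/vinchinzu/euler | python/167.py | next_ulam
-- ===== SOURCE A (Python) =====
-- from typing import Dict, List, Set, Tuple
--
-- def next_ulam(terms: List[int]) -> int:
--     """Generate the next Ulam number using the textbook definition."""
--     candidate = terms[-1] + 1
--     while True:
--         ways = 0
--         left = 0
--         right = len(terms) - 1
--
--         while left < right:
--             sum_val = terms[left] + terms[right]
--             if sum_val == candidate:
--                 ways += 1
--                 if ways > 1:
--                     break
--                 left += 1
--                 right -= 1
--             elif sum_val < candidate:
--                 left += 1
--             else:
--                 right -= 1
--
--         if ways == 1: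
--             terms.append(candidate)
--             return candidate
--
--         candidate += 1
-- ===== SOURCE B (Python) =====
-- def next_ulam(terms):
--     """Next Ulam number.  Counts ALL two-term representations of a candidate
--     with a recursive shrinking-window scan over list slices (no cap, no early
--     break), then searches candidates upward.  Appends the result like A."""
--
--     def representations(window, candidate):
--         if len(window) < 2:
--             return 0
--         s = window[0] + window[-1]
--         if s == candidate:
--             return 1 + representations(window[1:-1], candidate)
--         if s < candidate:
--             return representations(window[1:], candidate)
--         return representations(window[:-1], candidate)
--
--     candidate = terms[-1] + 1
--     while representations(terms, candidate) != 1: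
--         candidate += 1
--     terms.append(candidate)
--     return candidate
-- ===== Notes on version B (the rewrite author's own statement) =====
-- stated objective: alternative
-- what changed: B counts ALL two-term representations of each candidate with a recursive shrinking-window scan over list slices (consuming the window from both ends), instead of A's index-based two-pointer loop that caps the count at 2 and breaks early; same cost, no cap, no indices, no break.
import Mathlib
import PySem

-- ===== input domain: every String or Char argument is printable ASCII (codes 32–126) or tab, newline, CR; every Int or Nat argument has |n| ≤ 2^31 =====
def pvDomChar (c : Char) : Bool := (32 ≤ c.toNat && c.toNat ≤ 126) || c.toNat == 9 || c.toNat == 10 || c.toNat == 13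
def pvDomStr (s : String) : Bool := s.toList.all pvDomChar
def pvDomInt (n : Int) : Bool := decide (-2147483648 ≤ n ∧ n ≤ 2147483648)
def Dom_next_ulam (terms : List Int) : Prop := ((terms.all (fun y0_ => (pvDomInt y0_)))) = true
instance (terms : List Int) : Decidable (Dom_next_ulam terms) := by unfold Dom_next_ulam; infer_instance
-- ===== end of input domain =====

-- B counts ALL two-term representations of a candidate by a recursive
-- shrinking-window scan over list slices (no cap, no early break) instead of
-- A's index-based two-pointer that caps the count at 2 and breaks early.
-- Python A and B both append the result to `terms` in place; the equivalence
-- proved here is about the RETURN value only (both mutate identically anyway).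

-- ===== PORT A =====
-- Python's inner `while left < right` loop.  While left < right both indices
-- stay inside [0, terms.length - 1], so List.getD is exact for terms[left] /
-- terms[right] there.
def waysLoopA (terms : List Int) (candidate : Int) (left right ways : Nat) : Nat :=
  if _h : left < right then
    if terms.getD left 0 + terms.getD right 0 = candidate then
      if ways + 1 > 1 then ways + 1          -- `break` with ways = 2
      else waysLoopA terms candidate (left + 1) (right - 1) (ways + 1)
    else if terms.getD left 0 + terms.getD right 0 < candidate then
      waysLoopA terms candidate (left + 1) right ways
    else
      waysLoopA terms candidate left (right - 1) ways
  else ways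
termination_by right - left
decreasing_by all_goals omega

-- Python's outer `while True` loop; the fuel only makes the search total:
-- whenever the Python loop terminates it has found its candidate by
-- candidate = (largest pairwise sum) ≤ 2·max|terms[i]|, inside the fuel.
def searchA (terms : List Int) (candidate : Int) : Nat → Int
  | 0 => 0
  | fuel + 1 =>
    if waysLoopA terms candidate 0 (terms.length - 1) 0 = 1 then candidate
    else searchA terms (candidate + 1) fuel

def next_ulam (terms : List Int) : Int :=
  match PySem.List.pyGet? terms (-1) with
  | none => 0     -- Python raises IndexError here (last-element access of empty terms); excluded by Pre_
  | some last =>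
    searchA terms (last + 1) (4 * terms.foldl (fun a x => max a x.natAbs) 0 + 2)

-- ===== PORT B =====
-- `representations(window, candidate)`: recursion on the three Python slices
-- of the window (both ends dropped / first dropped / last dropped)
def representations (window : List Int) (candidate : Int) : Int :=
  if hlen : window.length < 2 then 0
  else
    let s := PySem.List.pyGetD window 0 0 + PySem.List.pyGetD window (-1) 0
    if s = candidate then
      1 + representations (PySem.List.slice window (some 1) (some (-1))) candidate
    else if s < candidate then
      representations (PySem.List.slice window (some 1) none) candidate
    else
      representations (PySem.List.slice window none (some (-1))) candidate
termination_by window.length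
decreasing_by
  · rw [PySem.List.length_slice, PySem.List.clampIdx_neg_one]
    have : PySem.List.clampIdx window.length 1 = min 1 window.length := by
      simp [PySem.List.clampIdx]
    omega
  · rw [PySem.List.slice_from_one, List.length_tail]
    omega
  · rw [PySem.List.slice_to_neg_one, List.length_dropLast]
    omega

-- Python's `while representations(terms, candidate) != 1` loop; fuel as in searchA.
def searchB (terms : List Int) (candidate : Int) : Nat → Int
  | 0 => 0
  | fuel + 1 =>
    if representations terms candidate ≠ 1 then searchB terms (candidate + 1) fuel
    else candidate

def next_ulam_alt (terms : List Int) : Int :=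
  match PySem.List.pyGet? terms (-1) with
  | none => 0     -- Python raises IndexError here (last-element access of empty terms); excluded by Pre_
  | some last =>
    searchB terms (last + 1) (4 * terms.foldl (fun a x => max a x.natAbs) 0 + 2)

-- ===== PRECONDITION & SPEC =====
-- Pre_ excludes only the empty list, on which both Pythons raise IndexError
-- at the last-element access of terms.
def Pre_next_ulam (terms : List Int) : Prop := terms ≠ []
instance (terms : List Int) : Decidable (Pre_next_ulam terms) := by
  unfold Pre_next_ulam; infer_instance

def pvWitness_next_ulam : List Int := [1, 2]

def Spec_next_ulam (terms : List Int) (out : Int) : Prop := out = next_ulam_alt terms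
instance (terms : List Int) (out : Int) : Decidable (Spec_next_ulam terms out) := by
  unfold Spec_next_ulam; infer_instance

-- ===== CLAIM (what is proved, stated in full; the proofs are below) =====
def Claim_equal_next_ulam : Prop := ∀ (terms : List Int), Dom_next_ulam terms → Pre_next_ulam terms → Spec_next_ulam terms (next_ulam terms)

-- ===== LEMMAS AND PROOFS =====

-- the window terms[l..r] that A's pointers (left = l, right = r) still cover
def win (t : List Int) (l r : Nat) : List Int := (t.drop l).take (r + 1 - l)

lemma win_length (t : List Int) (l r : Nat) (hr : r < t.length) :
    (win t l r).length = r + 1 - l := by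
  simp [win]; omega

lemma win_head (t : List Int) (l r : Nat) (hl : l ≤ r) (hr : r < t.length) :
    PySem.List.pyGetD (win t l r) 0 0 = t.getD l 0 := by
  rw [PySem.List.pyGetD_zero]
  rw [List.getD_eq_getElem (win t l r) 0 (by rw [win_length t l r hr]; omega),
    List.getD_eq_getElem t 0 (by omega)]
  simp [win]

lemma win_last (t : List Int) (l r : Nat) (hl : l ≤ r) (hr : r < t.length) :
    PySem.List.pyGetD (win t l r) (-1) 0 = t.getD r 0 := by
  have hne : win t l r ≠ [] := by
    intro h
    have := win_length t l r hr
    rw [h] at this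
    simp at this
    omega
  rw [PySem.List.pyGetD_neg_one (win t l r) 0 hne, List.getLast_eq_getElem,
    List.getD_eq_getElem t 0 hr]
  simp [win]
  congr 1
  omega

lemma win_tail (t : List Int) (l r : Nat) :
    PySem.List.slice (win t l r) (some 1) none = win t (l + 1) r := by
  rw [PySem.List.slice_from_one]
  simp only [win]
  rw [← List.drop_one, List.drop_take, List.drop_drop]
  congr 1

lemma win_init (t : List Int) (l r : Nat) (hlr : l < r) (hr : r < t.length) :
    PySem.List.slice (win t l r) none (some (-1)) = win t l (r - 1) := by
  rw [PySem.List.slice_to_neg_one]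
  simp only [win]
  rw [List.dropLast_eq_take, List.take_take]
  congr 1
  simp
  omega

lemma slice_one_negone (w : List Int) (h : 2 ≤ w.length) :
    PySem.List.slice w (some 1) (some (-1)) = (w.drop 1).take (w.length - 2) := by
  have hne : w ≠ [] := by intro he; rw [he] at h; simp at h
  have h1 : min 1 w.length = 1 := by omega
  simp [PySem.List.slice, PySem.List.clampIdx, hne, h1, List.drop_one]
  congr 1
  omega

lemma win_mid (t : List Int) (l r : Nat) (hlr : l < r) (hr : r < t.length) :
    PySem.List.slice (win t l r) (some 1) (some (-1)) = win t (l + 1) (r - 1) := by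
  rw [slice_one_negone _ (by rw [win_length t l r hr]; omega)]
  simp only [win]
  rw [List.drop_take, List.drop_drop, List.take_take]
  simp
  omega

lemma representations_nonneg_aux (n : Nat) :
    ∀ (w : List Int) (c : Int), w.length ≤ n → 0 ≤ representations w c := by
  induction n with
  | zero =>
    intro w c hw
    rw [representations, dif_pos (by omega)]
  | succ n ih =>
    intro w c hw
    rw [representations]
    by_cases h2 : w.length < 2
    · rw [dif_pos h2]
    · rw [dif_neg h2]
      have hne : w ≠ [] := by intro he; rw [he] at h2; simp at h2
      have lmid : (PySem.List.slice w (some 1) (some (-1))).length ≤ n := by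
        rw [PySem.List.length_slice, PySem.List.clampIdx_neg_one]
        have : PySem.List.clampIdx w.length 1 = min 1 w.length := by
          simp [PySem.List.clampIdx]
        omega
      have ltail : (PySem.List.slice w (some 1) none).length ≤ n := by
        rw [PySem.List.slice_from_one, List.length_tail]
        omega
      have linit : (PySem.List.slice w none (some (-1))).length ≤ n := by
        rw [PySem.List.slice_to_neg_one, List.length_dropLast]
        omega
      simp only []
      split_ifs
      · have := ih _ c lmid; omega
      · exact ih _ c ltail
      · exact ih _ c linit

lemma representations_nonneg (w : List Int) (c : Int) : 0 ≤ representations w c :=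
  representations_nonneg_aux w.length w c (le_refl _)

lemma waysLoopA_eq_representations (t : List Int) (c : Int) :
    ∀ d l r w, r - l ≤ d → r < t.length → w ≤ 1 →
      waysLoopA t c l r w = min (w + (representations (win t l r) c).toNat) 2 := by
  intro d
  induction d with
  | zero =>
    intro l r w hd hr hw
    rw [waysLoopA, dif_neg (by omega : ¬ l < r), representations,
      dif_pos (by rw [win_length t l r hr]; omega)]
    omega
  | succ d ih =>
    intro l r w hd hr hw
    rw [waysLoopA]
    by_cases hlr : l < r
    · rw [dif_pos hlr]
      have hrep : representations (win t l r) c =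
          if t.getD l 0 + t.getD r 0 = c then
            1 + representations (win t (l + 1) (r - 1)) c
          else if t.getD l 0 + t.getD r 0 < c then
            representations (win t (l + 1) r) c
          else representations (win t l (r - 1)) c := by
        rw [representations, dif_neg (by rw [win_length t l r hr]; omega)]
        simp only [win_head t l r (by omega) hr, win_last t l r (by omega) hr,
          win_mid t l r hlr hr, win_tail t l r, win_init t l r hlr hr]
      rcases lt_trichotomy (t.getD l 0 + t.getD r 0) c with hs | hs | hs
      · rw [if_neg (by omega), if_pos hs, ih (l + 1) r w (by omega) hr hw, hrep,
          if_neg (by omega), if_pos hs]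
      · rw [if_pos hs]
        have hnn := representations_nonneg (win t (l + 1) (r - 1)) c
        by_cases hw1 : w = 1
        · rw [if_pos (by omega), hrep, if_pos hs]
          omega
        · rw [if_neg (by omega),
            ih (l + 1) (r - 1) (w + 1) (by omega) (by omega) (by omega), hrep, if_pos hs]
          omega
      · rw [if_neg (by omega), if_neg (by omega),
          ih l (r - 1) w (by omega) (by omega) hw, hrep, if_neg (by omega),
          if_neg (by omega)]
    · rw [dif_neg hlr, representations,
        dif_pos (by rw [win_length t l r hr]; omega)]
      omega

lemma search_eq (t : List Int) (hn : 1 ≤ t.length) :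
    ∀ fuel c, searchA t c fuel = searchB t c fuel := by
  intro fuel
  induction fuel with
  | zero => intro c; rfl
  | succ f ih =>
    intro c
    have hwin : win t 0 (t.length - 1) = t := by
      simp [win]
      omega
    have hA : waysLoopA t c 0 (t.length - 1) 0 = min ((representations t c).toNat) 2 := by
      have := waysLoopA_eq_representations t c (t.length - 1) 0 (t.length - 1) 0
        (by omega) (by omega) (by omega)
      rw [hwin] at this
      simpa using this
    have hnn := representations_nonneg t c
    simp only [searchA, searchB, hA]
    by_cases h1 : representations t c = 1
    · simp [h1]
    · have ht : (representations t c).toNat ≠ 1 := by omega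
      have h2 : ¬ min (representations t c).toNat 2 = 1 := by omega
      simp [h1, h2, ih]

-- ===== VERDICT (by name: the statement is the Claim_ definition above) =====
theorem next_ulam_spec : Claim_equal_next_ulam := by
  intro terms _hdom hne
  unfold Spec_next_ulam next_ulam next_ulam_alt
  rw [PySem.List.pyGet?_neg_one, List.getLast?_eq_some_getLast hne]
  have hn : 1 ≤ terms.length := by
    cases terms with
    | nil => exact absurd rfl hne
    | cons x xs => simp
  exact search_eq terms hn _ _
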